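-- pv_equiv track=rewrite | github.com/alexandraback/datacollection | solutions_5738606668808192_0/Python/Lellow/CoinJam.py | convBin
-- ===== SOURCE A (Python) =====
-- def convBin(n):
--     s=0
--     i=0
--     while(n!=0):
--         if(n%2!=0):
--             s+=10**i
--         i+=1
--         n=n//2
--     return s
-- ===== SOURCE B (Python) =====
-- def convBin(n):
--     # recursive decomposition: binary digits of n read as a decimal number
--     if n == 0:
--         return 0
--     return convBin(n // 2) * 10 + n % 2
-- ===== Notes on version B (the rewrite author's own statement) =====
-- stated objective: simpler
-- what changed: Replaced the iterative loop maintaining a running power of ten with a direct recursion convBin(n//2)*10 + n%2, building the result most-significant-digit-first.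
import Mathlib
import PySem

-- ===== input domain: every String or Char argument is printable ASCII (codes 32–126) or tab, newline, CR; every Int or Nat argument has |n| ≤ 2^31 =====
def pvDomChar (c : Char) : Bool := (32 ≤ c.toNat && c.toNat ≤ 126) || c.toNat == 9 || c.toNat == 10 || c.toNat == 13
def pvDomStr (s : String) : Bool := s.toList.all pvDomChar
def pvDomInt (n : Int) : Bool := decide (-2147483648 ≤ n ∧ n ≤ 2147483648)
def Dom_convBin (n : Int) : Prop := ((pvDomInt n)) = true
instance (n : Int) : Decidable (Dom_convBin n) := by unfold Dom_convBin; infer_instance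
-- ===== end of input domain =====

-- B replaces A's bit loop with a running power of ten by a direct recursion
-- convBin(n//2)*10 + n%2 (objective: simpler). Both Pythons diverge for n < 0,
-- which Pre_ excludes.


-- ===== PORT A =====
-- Python's 'while n != 0' loop; for n < 0 the Python loop never terminates
-- (excluded by Pre_), so the guard is written '0 < n' to make the port total.
def convBinGo (n s i : Int) : Int :=
  if h : 0 < n then
    convBinGo (PySem.Int.floordiv n 2)
      (if PySem.Int.mod n 2 ≠ 0 then s + 10 ^ i.toNat else s) (i + 1)
  else s
termination_by n.toNat
decreasing_by
  have h2 : PySem.Int.floordiv n 2 = n / 2 := PySem.Int.floordiv_eq_ediv_of_pos (by omega)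
  omega

def convBin (n : Int) : Int := convBinGo n 0 0

-- ===== PORT B =====
-- Python B: 'return 0 if n == 0 else convBin(n // 2) * 10 + n % 2'; the guard is
-- '0 < n' (Python B also diverges for n < 0, excluded by Pre_).
def convBin_alt (n : Int) : Int :=
  if h : 0 < n then
    convBin_alt (PySem.Int.floordiv n 2) * 10 + PySem.Int.mod n 2
  else 0
termination_by n.toNat
decreasing_by
  have h2 : PySem.Int.floordiv n 2 = n / 2 := PySem.Int.floordiv_eq_ediv_of_pos (by omega)
  omega

-- ===== PRECONDITION & SPEC =====
-- For n < 0 the Python A loops forever (n//2 stabilises at -1), so A returns only for n ≥ 0.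
def Pre_convBin (n : Int) : Prop := 0 ≤ n
instance (n : Int) : Decidable (Pre_convBin n) := by unfold Pre_convBin; infer_instance
def pvWitness_convBin : Int := (6)

def Spec_convBin (n : Int) (out : Int) : Prop := out = convBin_alt n
instance (n : Int) (out : Int) : Decidable (Spec_convBin n out) := by unfold Spec_convBin; infer_instance

-- ===== CLAIM (what is proved, stated in full; the proofs are below) =====
def Claim_equal_convBin : Prop := ∀ (n : Int), Dom_convBin n → Pre_convBin n → Spec_convBin n (convBin n)

-- ===== LEMMAS AND PROOFS =====

-- loop invariant: the loop adds alt n scaled by the current power of ten to the accumulator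
theorem convBinGo_eq (k : Nat) : ∀ (n s i : Int), n.toNat = k → 0 ≤ i →
    convBinGo n s i = s + convBin_alt n * 10 ^ i.toNat := by
  induction k using Nat.strong_induction_on with
  | _ k ih =>
    intro n s i hk hi
    rw [convBinGo, convBin_alt]
    by_cases h : 0 < n
    · simp only [h, dif_pos]
      have h2 : PySem.Int.floordiv n 2 = n / 2 := PySem.Int.floordiv_eq_ediv_of_pos (by omega)
      have hm : PySem.Int.mod n 2 = n % 2 := PySem.Int.mod_eq_emod_of_pos (by omega)
      have hrec := ih (n / 2).toNat (by omega) (n / 2)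
        (if PySem.Int.mod n 2 ≠ 0 then s + 10 ^ i.toNat else s) (i + 1) rfl (by omega)
      rw [h2, hrec]
      have hip : (i + 1).toNat = i.toNat + 1 := by omega
      rw [hip]
      have he : n % 2 = 0 ∨ n % 2 = 1 := Int.emod_two_eq n
      rw [hm]
      rcases he with he | he <;> simp [he, pow_succ] <;> ring
    · simp [h]

-- ===== VERDICT (by name: the statement is the Claim_ definition above) =====
theorem convBin_spec : Claim_equal_convBin := by
  intro n _ hpre
  show convBin n = convBin_alt n
  have := convBinGo_eq n.toNat n 0 0 rfl le_rfl
  simpa [convBin] using this
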